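-- pv_equiv track=rewrite | github.com/BruE0/Misc | Numberphile/Amazing Graphs/fly_straight.py | fly_straight
-- ===== SOURCE A (Python) =====
-- from math import gcd
--
-- def fly_straight(max_terms=10000):
--     nums = [1, 1]
--     for n in range(2, max_terms):
--         gcdd = gcd(nums[-1], n)
--         if gcdd == 1:
--             nums.append(nums[-1] + n + 1)
--         else:
--             nums.append(nums[-1] // gcdd)
--     return nums
-- ===== SOURCE B (Python) =====
-- from math import gcd
--
-- # The recurrence collapses into a fixed period-4 pattern (n+2, 2n+4, 2, 1 for n = 3 mod 4)
-- # once the short chaotic prefix has played out, so only the first 639 terms need the gcd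
-- # recurrence; the rest is emitted by the closed form in blocks of four.
-- def fly_straight(max_terms=10000):
--     nums = [1, 1]
--     prev = 1
--     for n in range(2, min(max_terms, 639)):
--         g = gcd(prev, n)
--         prev = prev + n + 1 if g == 1 else prev // g
--         nums.append(prev)
--     tail = []
--     for n in range(639, max_terms, 4):
--         tail += [n + 2, 2 * n + 4, 2, 1]
--     return nums + tail[:max_terms - 639]
-- ===== Notes on version B (the rewrite author's own statement) =====
-- stated objective: faster
-- what changed: B runs the gcd recurrence only for a fixed short prefix, after which the sequence is locked into a period-four pattern, and emits every later term from that proven closed form in blocks of four instead of computing a gcd per term.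
import Mathlib
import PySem

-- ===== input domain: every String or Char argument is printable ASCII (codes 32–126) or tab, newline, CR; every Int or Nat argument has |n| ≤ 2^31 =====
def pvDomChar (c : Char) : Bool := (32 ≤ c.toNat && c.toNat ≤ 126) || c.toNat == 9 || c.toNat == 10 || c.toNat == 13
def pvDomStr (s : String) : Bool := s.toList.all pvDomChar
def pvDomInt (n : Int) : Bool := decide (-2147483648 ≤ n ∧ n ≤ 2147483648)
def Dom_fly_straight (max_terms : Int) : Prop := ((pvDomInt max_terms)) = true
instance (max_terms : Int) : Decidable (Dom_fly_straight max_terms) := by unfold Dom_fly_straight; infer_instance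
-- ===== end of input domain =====

-- B exploits that the recurrence locks into a fixed period-four pattern after a short
-- chaotic prefix, so it runs the gcd recurrence only for that prefix and emits the
-- remaining terms by a closed form in blocks of four; same value, different algorithm.

-- ===== PORT A =====
-- one loop iteration: read nums[-1] (list is always nonempty, so the getD 0 default is never used), append
def flyStepA (nums : List Int) (n : Int) : List Int :=
  let last := (PySem.List.pyGet? nums (-1)).getD 0
  let gcdd : Int := Int.gcd last n
  if gcdd = 1 then nums ++ [last + n + 1] else nums ++ [PySem.Int.floordiv last gcdd]

def fly_straight (max_terms : Int) : List Int :=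
  (PySem.List.pyRange 2 max_terms 1).foldl flyStepA [1, 1]

-- ===== PORT B =====
-- B's pure step function for the short gcd prefix (loop body with the running `prev`)
def flyF (prev n : Int) : Int :=
  let g : Int := Int.gcd prev n
  if g = 1 then prev + n + 1 else PySem.Int.floordiv prev g

-- B's tail loop body: the four closed-form terms for indices n, n+1, n+2, n+3 (n ≡ 3 mod 4)
def flyBlock (n : Int) : List Int := [n + 2, 2 * n + 4, 2, 1]

-- nums = [1,1]; prev tracked through the loop and appended  ⇒  1 :: scanl;
-- then tail blocks accumulated by `tail += [...]`, truncated by tail[:max_terms-639]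
def fly_straight_alt (max_terms : Int) : List Int :=
  let nums := 1 :: List.scanl flyF 1 (PySem.List.pyRange 2 (min max_terms 639) 1)
  let tail := (PySem.List.pyRange 639 max_terms 4).foldl (fun acc n => acc ++ flyBlock n) []
  nums ++ PySem.List.slice tail none (some (max_terms - 639))

-- ===== PRECONDITION & SPEC =====
def Spec_fly_straight (max_terms : Int) (out : List Int) : Prop := out = fly_straight_alt max_terms
instance (max_terms : Int) (out : List Int) : Decidable (Spec_fly_straight max_terms out) := by unfold Spec_fly_straight; infer_instance

-- ===== CLAIM =====
def Claim_equal_fly_straight : Prop := ∀ (max_terms : Int), Dom_fly_straight max_terms → Spec_fly_straight max_terms (fly_straight max_terms)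

-- ===== LEMMAS AND PROOFS =====

-- the closed-form value of term n, for n ≥ 638 (period 4)
def phi (n : Int) : Int :=
  if n % 4 = 3 then n + 2 else if n % 4 = 0 then 2 * n + 2 else if n % 4 = 1 then 2 else 1

theorem phi_3 {n : Int} (h : n % 4 = 3) : phi n = n + 2 := by simp [phi, h]
theorem phi_0 {n : Int} (h : n % 4 = 0) : phi n = 2 * n + 2 := by simp [phi, h]
theorem phi_1 {n : Int} (h : n % 4 = 1) : phi n = 2 := by simp [phi, h]
theorem phi_2 {n : Int} (h : n % 4 = 2) : phi n = 1 := by simp [phi, h]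

-- one A-step on a list ending in p appends exactly flyF p n
theorem flyStepA_append (xs : List Int) (p n : Int) :
    flyStepA (xs ++ [p]) n = (xs ++ [p]) ++ [flyF p n] := by
  simp only [flyStepA, flyF, PySem.List.pyGet?_neg_one_append_singleton, Option.getD_some]
  split_ifs <;> simp

-- loop invariant for the prefix: folding A's step over any index list = appending B's scan
theorem fold_eq_scan (L : List Int) : ∀ (xs : List Int) (p : Int),
    List.foldl flyStepA (xs ++ [p]) L = xs ++ List.scanl flyF p L := by
  induction L with
  | nil => intro xs p; simp
  | cons n ns ih =>
      intro xs p
      rw [List.foldl_cons, flyStepA_append, ih (xs ++ [p]) (flyF p n)]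
      simp [List.scanl]

-- the scan ends in its fold value
theorem scanl_eq_append_foldl (L : List Int) : ∀ (p : Int),
    ∃ xs, List.scanl flyF p L = xs ++ [List.foldl flyF p L] := by
  induction L with
  | nil => intro p; exact ⟨[], rfl⟩
  | cons n ns ih =>
      intro p
      obtain ⟨xs, hxs⟩ := ih (flyF p n)
      exact ⟨p :: xs, by rw [List.scanl_cons, List.foldl_cons, hxs]; simp⟩

-- term 638 of the sequence is 1 (a concrete 637-step computation)
set_option maxRecDepth 100000 in
set_option maxHeartbeats 4000000 in
theorem foldl_prefix_one : List.foldl flyF 1 (PySem.List.pyRange 2 639 1) = 1 := by decide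

-- evaluating B's step once the gcd is known
theorem flyF_gcd_one {p n : Int} (h : Int.gcd p n = 1) : flyF p n = p + n + 1 := by
  simp [flyF, h]

theorem flyF_gcd_ne_one {p n : Int} (g : Nat) (h : Int.gcd p n = g) (hne : ((g : Nat) : Int) ≠ 1) :
    flyF p n = PySem.Int.floordiv p g := by
  simp only [flyF, h]
  rw [if_neg hne]

-- once the last term is phi (n-1) with n ≥ 639, one A-step appends phi n
theorem flyStepA_phi (xs : List Int) (n : Int) (hn : 639 ≤ n) :
    flyStepA (xs ++ [phi (n - 1)]) n = (xs ++ [phi (n - 1)]) ++ [phi n] := by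
  rw [flyStepA_append]
  congr 2
  have h4 : n % 4 = 0 ∨ n % 4 = 1 ∨ n % 4 = 2 ∨ n % 4 = 3 := by omega
  rcases h4 with h | h | h | h
  · -- prev = (n-1)+2 = n+1, coprime to n
    rw [phi_3 (by omega), phi_0 h]
    have hg : Int.gcd (n - 1 + 2) n = 1 := by
      rw [show n - 1 + 2 = n + 1 from by ring]; simp
    rw [flyF_gcd_one hg]; ring
  · -- prev = 2(n-1)+2 = 2n, gcd = n, quotient 2
    rw [phi_0 (by omega), phi_1 h]
    have hg : Int.gcd (2 * (n - 1) + 2) n = n.natAbs := by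
      rw [show 2 * (n - 1) + 2 = 2 * n from by ring]
      have := Int.gcd_mul_right 2 n 1
      simpa using this
    have habs : ((n.natAbs : Nat) : Int) = n := by omega
    rw [flyF_gcd_ne_one n.natAbs hg (by omega)]
    rw [habs, PySem.Int.floordiv_eq_ediv_of_pos (by omega)]
    rw [show 2 * (n - 1) + 2 = 2 * n from by ring]
    exact Int.mul_ediv_cancel 2 (by omega)
  · -- prev = 2, n even, gcd = 2, quotient 1
    rw [phi_1 (by omega), phi_2 h]
    have hg : Int.gcd 2 n = 2 := by
      rw [Int.gcd_eq_natAbs_left (by omega : (2:Int) ∣ n)]; rfl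
    rw [flyF_gcd_ne_one 2 hg (by decide)]
    decide
  · -- prev = 1, gcd = 1
    rw [phi_2 (by omega), phi_3 h]
    rw [flyF_gcd_one (by simp)]
    ring

-- folding A's step over the whole tail range appends the closed form
theorem fold_tail (k : Nat) : ∀ (n m : Int), 639 ≤ n → (m - n).toNat = k → ∀ (xs : List Int),
    List.foldl flyStepA (xs ++ [phi (n - 1)]) (PySem.List.pyRange n m 1)
      = (xs ++ [phi (n - 1)]) ++ (PySem.List.pyRange n m 1).map phi := by
  induction k with
  | zero =>
      intro n m hn hk xs
      rw [PySem.List.pyRange_one_eq_nil (by omega)]; simp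
  | succ k ih =>
      intro n m hn hk xs
      rw [PySem.List.pyRange_one_cons (by omega : n < m)]
      rw [List.foldl_cons, flyStepA_phi xs n hn]
      have hrec := ih (n + 1) m (by omega) (by omega) (xs ++ [phi (n - 1)])
      have hsimp : n + 1 - 1 = n := by ring
      rw [hsimp] at hrec
      rw [hrec]
      simp

-- a cons lemma for a step-4 range
theorem pyRange_four_cons {a b : Int} (h : a < b) :
    PySem.List.pyRange a b 4 = a :: PySem.List.pyRange (a + 4) b 4 := by
  rw [PySem.List.pyRange_of_pos a b (by norm_num),
      PySem.List.pyRange_of_pos (a + 4) b (by norm_num)]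
  have hcount : (if a < b then ((b - a + 4 - 1) / 4).toNat else 0)
      = (if a + 4 < b then ((b - (a + 4) + 4 - 1) / 4).toNat else 0) + 1 := by
    split_ifs <;> omega
  rw [hcount, List.range_succ_eq_map]
  simp only [List.map_cons, List.map_map, Nat.cast_zero, mul_zero, add_zero]
  congr 1
  apply List.map_congr_left
  intro k _
  simp only [Function.comp_apply, Nat.succ_eq_add_one]
  push_cast
  ring

theorem pyRange_four_nil {a b : Int} (h : b ≤ a) : PySem.List.pyRange a b 4 = [] := by
  rw [PySem.List.pyRange_of_pos a b (by norm_num)]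
  simp [Int.not_lt.mpr h]

-- B's block tail, truncated, is exactly the closed form over the step-1 range
theorem blocks_eq_map (k : Nat) : ∀ (n m : Int), 639 ≤ n → n % 4 = 3 → (m - n).toNat = k →
    ((PySem.List.pyRange n m 4).flatMap flyBlock).take k = (PySem.List.pyRange n m 1).map phi := by
  induction k using Nat.strong_induction_on with
  | _ k ih =>
      intro n m hn h4 hk
      by_cases hnm : m ≤ n
      · rw [pyRange_four_nil hnm, PySem.List.pyRange_one_eq_nil hnm]
        simp
      · push_neg at hnm
        rw [pyRange_four_cons hnm, List.flatMap_cons]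
        have e0 : phi n = n + 2 := phi_3 h4
        have e1 : phi (n + 1) = 2 * n + 4 := by rw [phi_0 (by omega)]; ring
        have e2 : phi (n + 2) = 2 := phi_1 (by omega)
        have e3 : phi (n + 3) = 1 := phi_2 (by omega)
        by_cases hblk : n + 4 ≤ m
        · -- a full block, then recurse
          have hk4 : 4 ≤ k := by omega
          have hsplit : PySem.List.pyRange n m 1
              = [n, n + 1, n + 2, n + 3] ++ PySem.List.pyRange (n + 4) m 1 := by
            rw [PySem.List.pyRange_one_cons (by omega : n < m)]
            rw [PySem.List.pyRange_one_cons (by omega : n + 1 < m)]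
            rw [show n + 1 + 1 = n + 2 from by ring]
            rw [PySem.List.pyRange_one_cons (by omega : n + 2 < m)]
            rw [show n + 2 + 1 = n + 3 from by ring]
            rw [PySem.List.pyRange_one_cons (by omega : n + 3 < m)]
            rw [show n + 3 + 1 = n + 4 from by ring]
            simp
          rw [hsplit, List.map_append]
          have hrec := ih (k - 4) (by omega) (n + 4) m (by omega) (by omega) (by omega)
          simp only [flyBlock, List.cons_append, List.nil_append]
          rw [show k = k - 4 + 1 + 1 + 1 + 1 from by omega]
          simp only [List.take_succ_cons]
          rw [hrec]
          simp [e0, e1, e2, e3]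
        · -- partial final block: m - n ∈ {1, 2, 3}
          push_neg at hblk
          rw [pyRange_four_nil (by omega : m ≤ n + 4)]
          simp only [List.flatMap_nil, List.append_nil]
          have hk3 : k = 1 ∨ k = 2 ∨ k = 3 := by omega
          rcases hk3 with h | h | h
          · have hm : m = n + 1 := by omega
            rw [hm, PySem.List.pyRange_one_singleton, h]
            simp [flyBlock, e0]
          · have hm : m = n + 2 := by omega
            rw [hm, PySem.List.pyRange_one_cons (by omega : n < n + 2)]
            have : PySem.List.pyRange (n + 1) (n + 2) 1 = [n + 1] := by
              have := PySem.List.pyRange_one_singleton (a := n + 1)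
              simpa [add_assoc] using this
            rw [this, h]
            simp [flyBlock, e0, e1]
          · have hm : m = n + 3 := by omega
            rw [hm, PySem.List.pyRange_one_cons (by omega : n < n + 3),
                PySem.List.pyRange_one_cons (by omega : n + 1 < n + 3)]
            have h12 : n + 1 + 1 = n + 2 := by ring
            rw [h12]
            have : PySem.List.pyRange (n + 2) (n + 3) 1 = [n + 2] := by
              have := PySem.List.pyRange_one_singleton (a := n + 2)
              simpa [add_assoc] using this
            rw [this, h]
            simp [flyBlock, e0, e1, e2]

-- ===== VERDICT =====
theorem fly_straight_spec : Claim_equal_fly_straight := by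
  intro m _
  show fly_straight m = fly_straight_alt m
  unfold fly_straight
  rw [show fly_straight_alt m
      = (1 :: List.scanl flyF 1 (PySem.List.pyRange 2 (min m 639) 1))
        ++ PySem.List.slice ((PySem.List.pyRange 639 m 4).foldl (fun acc n => acc ++ flyBlock n) [])
             none (some (m - 639)) from rfl]
  by_cases hm : m ≤ 639
  · -- no tail: both are the plain scan
    rw [min_eq_left hm, pyRange_four_nil hm]
    simp only [List.foldl_nil]
    have hsl : PySem.List.slice ([] : List Int) none (some (m - 639)) = [] := by
      simp [PySem.List.slice]
    rw [hsl, List.append_nil]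
    have := fold_eq_scan (PySem.List.pyRange 2 m 1) [1] 1
    simpa using this
  · push_neg at hm
    rw [min_eq_right (by omega : (639 : Int) ≤ m)]
    -- split A's range at 639
    rw [PySem.List.pyRange_one_append 2 639 m (by omega) (by omega), List.foldl_append]
    -- the prefix fold is the scan, and the scan ends in term 638, which is 1 = phi (639-1)
    have hpre : List.foldl flyStepA [1, 1] (PySem.List.pyRange 2 639 1)
        = [1] ++ List.scanl flyF 1 (PySem.List.pyRange 2 639 1) := by
      have := fold_eq_scan (PySem.List.pyRange 2 639 1) [1] 1
      simpa using this
    obtain ⟨ys, hys⟩ := scanl_eq_append_foldl (PySem.List.pyRange 2 639 1) 1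
    rw [foldl_prefix_one] at hys
    have h638 : phi (639 - 1) = 1 := by decide
    -- the tail fold appends the closed form
    have hfold := fold_tail (m - 639).toNat 639 m (by omega) rfl ([1] ++ ys)
    rw [h638] at hfold
    rw [hpre, hys, ← List.append_assoc, hfold]
    -- B's block tail, truncated, is the same closed form
    have htail : ((PySem.List.pyRange 639 m 4).foldl (fun acc n => acc ++ flyBlock n) []) =
        (PySem.List.pyRange 639 m 4).flatMap flyBlock := by
      have := PySem.List.foldl_append_eq_flatMap flyBlock (PySem.List.pyRange 639 m 4) []
      simpa using this
    have hslice : PySem.List.slice ((PySem.List.pyRange 639 m 4).flatMap flyBlock) none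
        (some (m - 639)) = ((PySem.List.pyRange 639 m 4).flatMap flyBlock).take (m - 639).toNat := by
      have h := PySem.List.slice_to_natCast ((PySem.List.pyRange 639 m 4).flatMap flyBlock) (m - 639).toNat
      rw [show (((m - 639).toNat : Nat) : Int) = m - 639 from by omega] at h
      exact h
    rw [htail, hslice, blocks_eq_map (m - 639).toNat 639 m (by omega) (by decide) rfl]
    simp
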